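-- pv_equiv track=rewrite | github.com/bibekmaharjan77/DDP-Under-Predictions | run1250410.py | generate_type2_submeshes
-- ===== SOURCE A (Python) =====
-- import math, os, random
-- from collections import Counter, defaultdict
--
-- def xy_to_id_layout(x, y, size, layout=None):
--     """
--     If layout is None: row-major id = x*size + y (old behavior).
--     If layout is a list of length n: returns layout[x*size + y].
--     """
--     idx = x*size + y
--     if layout is None:
--         return idx
--     return layout[idx]
--
-- def generate_type2_submeshes(size, layout=None):
--     levels = int(math.log2(size))
--     hierarchy = defaultdict(list)
--     for level in range(1, levels):
--         b = 2**level
--         off = b//2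
--         for i in range(-off, size, b):
--             for j in range(-off, size, b):
--                 nodes = {
--                     xy_to_id_layout(x, y, size, layout)
--                     for x in range(i, i+b)
--                     for y in range(j, j+b)
--                     if 0 <= x < size and 0 <= y < size
--                 }
--                 if nodes:
--                     hierarchy[(level,1)].append(nodes)
--     return hierarchy
-- ===== SOURCE B (Python) =====
-- import math
-- from collections import defaultdict
--
--
-- def xy_to_id_layout(x, y, size, layout=None):
--     idx = x * size + y
--     if layout is None:
--         return idx
--     return layout[idx]
--
--
-- def generate_type2_submeshes(size, layout=None):
--     levels = int(math.log2(size))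
--     hierarchy = defaultdict(list)
--     for level in range(1, levels):
--         b = 2 ** level
--         off = b // 2
--         nb = (size + off + b - 1) // b  # number of block indices per axis
--         # one pass over all nodes, grouping each into its unique block
--         blocks = {}
--         for x in range(size):
--             ki = (x + off) // b
--             for y in range(size):
--                 blocks.setdefault((ki, (y + off) // b), set()).add(
--                     xy_to_id_layout(x, y, size, layout))
--         # emit blocks that received nodes, in ascending (ki, kj) order
--         for ki in range(nb):
--             for kj in range(nb):
--                 key = (ki, kj)
--                 if key in blocks:
--                     hierarchy[(level, 1)].append(blocks[key])
--     return hierarchy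
-- ===== Notes on version B (the rewrite author's own statement) =====
-- stated objective: alternative
-- what changed: Instead of scanning each (overhanging) b-by-b block region with per-cell bound checks and a non-empty filter, B makes one pass over the mesh nodes per level, grouping each node id into its unique block via floor-divided keys (ki,kj)=((x+off)//b,(y+off)//b), then emits the populated blocks by scanning the block-index grid in ascending order.
import Mathlib
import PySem

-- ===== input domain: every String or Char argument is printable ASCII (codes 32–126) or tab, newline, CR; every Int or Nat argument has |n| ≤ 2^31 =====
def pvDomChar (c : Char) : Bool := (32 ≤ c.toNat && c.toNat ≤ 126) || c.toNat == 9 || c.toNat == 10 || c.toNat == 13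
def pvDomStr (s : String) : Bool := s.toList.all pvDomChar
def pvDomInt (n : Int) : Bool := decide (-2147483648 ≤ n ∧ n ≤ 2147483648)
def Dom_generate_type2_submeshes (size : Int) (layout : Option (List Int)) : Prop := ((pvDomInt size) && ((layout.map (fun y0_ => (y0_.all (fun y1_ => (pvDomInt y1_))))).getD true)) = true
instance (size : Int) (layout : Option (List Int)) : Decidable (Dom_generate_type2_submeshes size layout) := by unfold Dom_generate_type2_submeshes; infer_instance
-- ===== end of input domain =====

-- B replaces A's per-block region scan (with per-cell bound checks over a grid that
-- overhangs the mesh) by one pass over the mesh nodes that groups each node into its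
-- unique block via floor division, then emits the populated blocks in ascending
-- (ki, kj) order; objective: alternative (same asymptotic cost, different algorithm).

-- ===== PORT A =====
-- shared module helper xy_to_id_layout (used by both Pythons);
-- layout[idx] is pyGetD: exact under Pre_, which keeps idx inside layout
def pvXyToId (x y size : Int) (layout : Option (List Int)) : Int :=
  match layout with
  | none => x * size + y
  | some l => PySem.List.pyGetD l (x * size + y) 0

-- int(math.log2(size)) = size.bit_length() - 1, exact for 1 ≤ size ≤ 2^31
-- (the float log2 of such ints never rounds across an integer boundary)
def generate_type2_submeshes (size : Int) (layout : Option (List Int)) : List (Int × Int × List (List Int)) :=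
  let levels : Int := (PySem.Int.bitLength size : Int) - 1
  let hierarchy : PySem.Dict (Int × Int) (List (List Int)) :=
    (PySem.List.pyRange 1 levels 1).foldl (fun h level =>
      let b : Int := 2 ^ level.toNat
      let off : Int := PySem.Int.floordiv b 2
      (PySem.List.pyRange (-off) size b).foldl (fun h i =>
        (PySem.List.pyRange (-off) size b).foldl (fun h j =>
          let nodes : PySem.Set Int :=
            (PySem.List.pyRange i (i + b) 1).foldl (fun s x =>
              (PySem.List.pyRange j (j + b) 1).foldl (fun s y =>
                if 0 ≤ x ∧ x < size ∧ 0 ≤ y ∧ y < size then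
                  PySem.Set.add s (pvXyToId x y size layout)
                else s) s) PySem.Set.empty
          if nodes = [] then h
          else h.modify (level, 1) [] (fun lst => lst ++ [nodes])) h) h)
      PySem.Dict.empty
  hierarchy.items.map (fun p => (p.1.1, p.1.2, p.2))

-- ===== PORT B =====
-- blocks.setdefault(key, set()).add(v) is Dict.modify key Set.empty (Set.add · v) (exact)
def generate_type2_submeshes_alt (size : Int) (layout : Option (List Int)) : List (Int × Int × List (List Int)) :=
  let levels : Int := (PySem.Int.bitLength size : Int) - 1
  let hierarchy : PySem.Dict (Int × Int) (List (List Int)) :=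
    (PySem.List.pyRange 1 levels 1).foldl (fun h level =>
      let b : Int := 2 ^ level.toNat
      let off : Int := PySem.Int.floordiv b 2
      let nb : Int := PySem.Int.floordiv (size + off + b - 1) b
      let blocks : PySem.Dict (Int × Int) (PySem.Set Int) :=
        (PySem.List.pyRange 0 size 1).foldl (fun d x =>
          let ki : Int := PySem.Int.floordiv (x + off) b
          (PySem.List.pyRange 0 size 1).foldl (fun d y =>
            d.modify (ki, PySem.Int.floordiv (y + off) b) PySem.Set.empty
              (fun s => PySem.Set.add s (pvXyToId x y size layout))) d)
          PySem.Dict.empty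
      (PySem.List.pyRange 0 nb 1).foldl (fun h ki =>
        (PySem.List.pyRange 0 nb 1).foldl (fun h kj =>
          if blocks.contains (ki, kj) then
            h.modify (level, 1) [] (fun lst => lst ++ [blocks.getD (ki, kj) PySem.Set.empty])
          else h) h) h)
      PySem.Dict.empty
  hierarchy.items.map (fun p => (p.1.1, p.1.2, p.2))

-- ===== PRECONDITION & SPEC =====
-- Pre_ = exactly where Python A returns: math.log2(size) raises for size ≤ 0, and for
-- size ≥ 4 (i.e. as soon as the level loop runs) every cell id x*size+y ∈ [0, size²)
-- is read from layout, so a shorter layout raises IndexError.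
def Pre_generate_type2_submeshes (size : Int) (layout : Option (List Int)) : Prop :=
  1 ≤ size ∧ layout.all (fun l => decide (4 ≤ size → size * size ≤ (l.length : Int))) = true
instance (size : Int) (layout : Option (List Int)) : Decidable (Pre_generate_type2_submeshes size layout) := by unfold Pre_generate_type2_submeshes; infer_instance
def pvWitness_generate_type2_submeshes : Int × Option (List Int) := (4, none)

def Spec_generate_type2_submeshes (size : Int) (layout : Option (List Int)) (out : List (Int × Int × List (List Int))) : Prop := out = generate_type2_submeshes_alt size layout
instance (size : Int) (layout : Option (List Int)) (out : List (Int × Int × List (List Int))) : Decidable (Spec_generate_type2_submeshes size layout out) := by unfold Spec_generate_type2_submeshes; infer_instance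

-- ===== CLAIM (what is proved, stated in full; the proofs are below) =====
def Claim_equal_generate_type2_submeshes : Prop := ∀ (size : Int) (layout : Option (List Int)), Dom_generate_type2_submeshes size layout → Pre_generate_type2_submeshes size layout → Spec_generate_type2_submeshes size layout (generate_type2_submeshes size layout)

-- ===== LEMMAS AND PROOFS =====

-- proof-only abbreviations: the clipped block cell list, the block set, the node grid,
-- the block-key map and the grouping dict of B
def pvAdd1 (size : Int) (layout : Option (List Int)) : PySem.Set Int → Int × Int → PySem.Set Int :=
  fun s p => PySem.Set.add s (pvXyToId p.1 p.2 size layout)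
def pvP (size b i j : Int) : List (Int × Int) :=
  (PySem.List.pyRange (max i 0) (min (i + b) size) 1).flatMap
    (fun x => (PySem.List.pyRange (max j 0) (min (j + b) size) 1).map (fun y => (x, y)))
def pvS (size : Int) (layout : Option (List Int)) (b i j : Int) : PySem.Set Int :=
  (pvP size b i j).foldl (pvAdd1 size layout) PySem.Set.empty
def pvGrid (size : Int) : List (Int × Int) :=
  (PySem.List.pyRange 0 size 1).flatMap (fun x => (PySem.List.pyRange 0 size 1).map (fun y => (x, y)))
def pvKey (b off : Int) (p : Int × Int) : Int × Int :=
  (PySem.Int.floordiv (p.1 + off) b, PySem.Int.floordiv (p.2 + off) b)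
def pvBlocks (size : Int) (layout : Option (List Int)) (b off : Int) : PySem.Dict (Int × Int) (PySem.Set Int) :=
  (pvGrid size).foldl (fun d p =>
    d.modify (pvKey b off p) PySem.Set.empty (fun s => PySem.Set.add s (pvXyToId p.1 p.2 size layout)))
    PySem.Dict.empty

-- a loop whose body is guarded by a test is the loop over the filtered list
theorem pv_foldl_ite_filter {α β : Type} (l : List α) (p : α → Prop) [DecidablePred p]
    (f : β → α → β) (s : β) :
    l.foldl (fun s x => if p x then f s x else s) s = (l.filter (fun x => decide (p x))).foldl f s := by
  induction l generalizing s with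
  | nil => rfl
  | cons a t ih => by_cases h : p a <;> simp [h, ih]

-- filtering a unit-step range by an interval test is the clipped range
theorem pv_filter_pyRange (a c lo hi : Int) :
    (PySem.List.pyRange a c 1).filter (fun x => decide (lo ≤ x ∧ x < hi)) =
      PySem.List.pyRange (max a lo) (min c hi) 1 := by
  by_cases hac : a < c
  · induction hn : (c - a).toNat generalizing a with
    | zero => omega
    | succ m ih =>
      rw [PySem.List.pyRange_one_cons hac]
      have hrest : (PySem.List.pyRange (a+1) c 1).filter (fun x => decide (lo ≤ x ∧ x < hi)) =
          PySem.List.pyRange (max (a+1) lo) (min c hi) 1 := by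
        by_cases hac2 : a + 1 < c
        · exact ih (a+1) hac2 (by omega)
        · rw [PySem.List.pyRange_one_eq_nil (by omega : c ≤ a + 1),
              PySem.List.pyRange_one_eq_nil (by omega : min c hi ≤ max (a+1) lo)]
          rfl
      by_cases hp : lo ≤ a ∧ a < hi
      · simp only [List.filter_cons, hp, and_self, decide_true, if_pos, hrest]
        rw [show max (a+1) lo = a + 1 by omega,
            show max a lo = a by omega,
            PySem.List.pyRange_one_cons (by omega : a < min c hi)]
      · simp only [List.filter_cons, hp, decide_false, Bool.false_eq_true, if_false, hrest]
        by_cases hlo : a < lo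
        · rw [show max (a+1) lo = lo by omega, show max a lo = lo by omega]
        · rw [PySem.List.pyRange_one_eq_nil (by omega : min c hi ≤ max (a+1) lo),
              PySem.List.pyRange_one_eq_nil (by omega : min c hi ≤ max a lo)]
  · rw [PySem.List.pyRange_one_eq_nil (by omega),
        PySem.List.pyRange_one_eq_nil (by omega)]
    rfl

-- the value stored under k by a grouping loop is the fold over the matching inputs
theorem pv_getD_group {β : Type} (l : List β) (key : β → Int × Int) (v : β → Int)
    (d : PySem.Dict (Int × Int) (PySem.Set Int)) (k : Int × Int) :
    (l.foldl (fun d p => d.modify (key p) PySem.Set.empty (fun s => PySem.Set.add s (v p))) d).getD k PySem.Set.empty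
      = (l.filter (fun p => decide (key p = k))).foldl (fun s p => PySem.Set.add s (v p))
          (d.getD k PySem.Set.empty) := by
  induction l generalizing d with
  | nil => rfl
  | cons p t ih =>
    simp only [List.foldl_cons, List.filter_cons]
    rw [ih]
    by_cases hk : key p = k
    · simp only [hk, decide_true, if_pos, List.foldl_cons]
      rw [show (d.modify k PySem.Set.empty (fun s => PySem.Set.add s (v p))).getD k PySem.Set.empty
            = PySem.Set.add (d.getD k PySem.Set.empty) (v p) from by
        rw [PySem.Dict.getD_modify]; simp]
    · simp only [hk, decide_false, Bool.false_eq_true, if_false]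
      rw [show (d.modify (key p) PySem.Set.empty (fun s => PySem.Set.add s (v p))).getD k PySem.Set.empty
            = d.getD k PySem.Set.empty from by
        rw [PySem.Dict.getD_modify]; simp [Ne.symm hk]]

theorem pv_add_ne_nil (s : PySem.Set Int) (x : Int) : PySem.Set.add s x ≠ [] := by
  rw [PySem.Set.add_eq_ite]
  by_cases h : x ∈ s
  · simp only [h, if_pos]
    intro hn
    rw [hn] at h
    exact absurd h (List.not_mem_nil)
  · simp [h]

theorem pv_foldl_add_ne_nil {β : Type} (l : List β) (v : β → Int) (s : PySem.Set Int)
    (h : s ≠ [] ∨ l ≠ []) :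
    l.foldl (fun s p => PySem.Set.add s (v p)) s ≠ [] := by
  induction l generalizing s with
  | nil => simpa using h
  | cons p t ih => exact ih (PySem.Set.add s (v p)) (Or.inl (pv_add_ne_nil s (v p)))

theorem pv_flatMap_if {α β : Type} (l : List α) (p : α → Bool) (g : α → List β) :
    l.flatMap (fun x => if p x then g x else []) = (l.filter p).flatMap g := by
  induction l with
  | nil => rfl
  | cons a t ih => cases h : p a <;> simp [h, ih]

-- which block a coordinate falls into, as an interval condition
theorem pv_fd_eq_iff (b off ki x : Int) (hb : 0 < b) :
    PySem.Int.floordiv (x + off) b = ki ↔ (-off + b * ki ≤ x ∧ x < -off + b * ki + b) := by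
  rw [PySem.Int.floordiv_eq_iff_of_pos hb, add_one_mul, mul_comm ki b]
  constructor <;> intro h <;> exact ⟨by linarith [h.1, h.2], by linarith [h.1, h.2]⟩

-- A's per-block set comprehension is the fold over the clipped cell list
theorem pv_nodesA_eq (size : Int) (layout : Option (List Int)) (b i j : Int) :
    (PySem.List.pyRange i (i + b) 1).foldl (fun s x =>
        (PySem.List.pyRange j (j + b) 1).foldl (fun s y =>
          if 0 ≤ x ∧ x < size ∧ 0 ≤ y ∧ y < size then
            PySem.Set.add s (pvXyToId x y size layout)
          else s) s) PySem.Set.empty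
      = pvS size layout b i j := by
  have hinner : ∀ (x : Int) (s : PySem.Set Int),
      (PySem.List.pyRange j (j + b) 1).foldl (fun s y =>
          if 0 ≤ x ∧ x < size ∧ 0 ≤ y ∧ y < size then
            PySem.Set.add s (pvXyToId x y size layout)
          else s) s
        = if 0 ≤ x ∧ x < size then
            (PySem.List.pyRange (max j 0) (min (j + b) size) 1).foldl
              (fun s y => PySem.Set.add s (pvXyToId x y size layout)) s
          else s := by
    intro x s
    rw [pv_foldl_ite_filter (PySem.List.pyRange j (j + b) 1)
        (fun y => 0 ≤ x ∧ x < size ∧ 0 ≤ y ∧ y < size)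
        (fun s y => PySem.Set.add s (pvXyToId x y size layout)) s]
    by_cases hx : 0 ≤ x ∧ x < size
    · rw [if_pos hx]
      congr 1
      rw [show (fun y => decide (0 ≤ x ∧ x < size ∧ 0 ≤ y ∧ y < size))
            = (fun y : Int => decide (0 ≤ y ∧ y < size)) from by
        funext y; exact decide_eq_decide.mpr (by tauto)]
      exact pv_filter_pyRange j (j + b) 0 size
    · rw [if_neg hx]
      rw [show List.filter (fun y => decide (0 ≤ x ∧ x < size ∧ 0 ≤ y ∧ y < size))
            (PySem.List.pyRange j (j + b) 1) = [] from by
        apply List.filter_eq_nil_iff.mpr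
        intro y _
        simp only [decide_eq_true_eq]
        tauto]
      rfl
  calc (PySem.List.pyRange i (i + b) 1).foldl (fun s x =>
        (PySem.List.pyRange j (j + b) 1).foldl (fun s y =>
          if 0 ≤ x ∧ x < size ∧ 0 ≤ y ∧ y < size then
            PySem.Set.add s (pvXyToId x y size layout)
          else s) s) PySem.Set.empty
      = (PySem.List.pyRange i (i + b) 1).foldl (fun s x =>
          if 0 ≤ x ∧ x < size then
            (PySem.List.pyRange (max j 0) (min (j + b) size) 1).foldl
              (fun s y => PySem.Set.add s (pvXyToId x y size layout)) s
          else s) PySem.Set.empty := by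
        exact PySem.List.foldl_congr_mem _ _ _ _ (fun s x _ => hinner x s)
    _ = pvS size layout b i j := by
        rw [pv_foldl_ite_filter (PySem.List.pyRange i (i + b) 1) (fun x => 0 ≤ x ∧ x < size)]
        rw [pv_filter_pyRange i (i + b) 0 size]
        unfold pvS pvP pvAdd1
        rw [List.foldl_flatMap]
        congr 1
        funext s x
        rw [List.foldl_map]

-- B's nested node loop IS the fold over the grid list
theorem pv_blocks_flat (size : Int) (layout : Option (List Int)) (b off : Int) :
    (PySem.List.pyRange 0 size 1).foldl (fun d x =>
        (PySem.List.pyRange 0 size 1).foldl (fun d y =>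
          d.modify (PySem.Int.floordiv (x + off) b, PySem.Int.floordiv (y + off) b) PySem.Set.empty
            (fun s => PySem.Set.add s (pvXyToId x y size layout))) d)
        PySem.Dict.empty
      = pvBlocks size layout b off := by
  unfold pvBlocks pvGrid
  rw [List.foldl_flatMap]
  congr 1
  funext d x
  rw [List.foldl_map]
  rfl

-- the grid cells that fall into block (ki, kj) are exactly its clipped cell list
theorem pv_filter_grid (size b off ki kj : Int) (hb : 0 < b) :
    (pvGrid size).filter (fun p => decide (pvKey b off p = (ki, kj)))
      = pvP size b (-off + b * ki) (-off + b * kj) := by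
  unfold pvGrid pvP
  rw [List.filter_flatMap]
  have hx : ∀ x : Int,
      ((PySem.List.pyRange 0 size 1).map (fun y => (x, y))).filter
          (fun p => decide (pvKey b off p = (ki, kj)))
        = if decide (PySem.Int.floordiv (x + off) b = ki) then
            ((PySem.List.pyRange 0 size 1).filter
              (fun y => decide (PySem.Int.floordiv (y + off) b = kj))).map (fun y => (x, y))
          else [] := by
    intro x
    rw [List.filter_map]
    by_cases hki : PySem.Int.floordiv (x + off) b = ki
    · rw [if_pos (by simpa using hki)]
      congr 1
      apply List.filter_congr
      intro y _
      simp [pvKey, Prod.ext_iff, hki]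
    · rw [if_neg (by simpa using hki)]
      rw [List.filter_eq_nil_iff.mpr (by intro p _; simp [pvKey, Prod.ext_iff]; tauto)]
      rfl
  calc ((PySem.List.pyRange 0 size 1).flatMap fun x =>
          ((PySem.List.pyRange 0 size 1).map (fun y => (x, y))).filter
            (fun p => decide (pvKey b off p = (ki, kj))))
      = (PySem.List.pyRange 0 size 1).flatMap (fun x =>
          if decide (PySem.Int.floordiv (x + off) b = ki) then
            ((PySem.List.pyRange 0 size 1).filter
              (fun y => decide (PySem.Int.floordiv (y + off) b = kj))).map (fun y => (x, y))
          else []) := by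
        apply List.flatMap_congr
        intro x _
        exact hx x
    _ = _ := by
        rw [pv_flatMap_if]
        rw [show (fun x : Int => decide (PySem.Int.floordiv (x + off) b = ki))
              = (fun x : Int => decide (-off + b * ki ≤ x ∧ x < -off + b * ki + b)) from by
          funext x; exact decide_eq_decide.mpr (pv_fd_eq_iff b off ki x hb)]
        rw [show (fun y : Int => decide (PySem.Int.floordiv (y + off) b = kj))
              = (fun y : Int => decide (-off + b * kj ≤ y ∧ y < -off + b * kj + b)) from by
          funext y; exact decide_eq_decide.mpr (pv_fd_eq_iff b off kj y hb)]
        rw [pv_filter_pyRange 0 size (-off + b * ki) ((-off + b * ki) + b),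
            pv_filter_pyRange 0 size (-off + b * kj) ((-off + b * kj) + b)]
        rw [max_comm 0 (-off + b * ki), max_comm 0 (-off + b * kj),
            min_comm size ((-off + b * ki) + b), min_comm size ((-off + b * kj) + b)]

theorem pv_getD_blocks (size : Int) (layout : Option (List Int)) (b off ki kj : Int) (hb : 0 < b) :
    (pvBlocks size layout b off).getD (ki, kj) PySem.Set.empty
      = pvS size layout b (-off + b * ki) (-off + b * kj) := by
  unfold pvBlocks
  rw [pv_getD_group (pvGrid size) (pvKey b off) (fun p => pvXyToId p.1 p.2 size layout)
      PySem.Dict.empty (ki, kj)]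
  rw [PySem.Dict.getD_empty, pv_filter_grid size b off ki kj hb]
  rfl

theorem pv_mem_P (size b i j : Int) (hs : 1 ≤ size) (hb : 0 < b)
    (hi1 : i < size) (hi2 : 0 < i + b) (hj1 : j < size) (hj2 : 0 < j + b) :
    (max i 0, max j 0) ∈ pvP size b i j := by
  unfold pvP
  refine List.mem_flatMap.mpr ⟨max i 0, ?_, ?_⟩
  · rw [PySem.List.mem_pyRange_one]; omega
  · exact List.mem_map.mpr ⟨max j 0, by rw [PySem.List.mem_pyRange_one]; omega, rfl⟩

theorem pv_mem_grid (size b off ki kj : Int) (hs : 1 ≤ size) (hb : 0 < b)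
    (hi1 : -off + b * ki < size) (hi2 : 0 < -off + b * ki + b)
    (hj1 : -off + b * kj < size) (hj2 : 0 < -off + b * kj + b) :
    ∃ p ∈ pvGrid size, pvKey b off p = (ki, kj) := by
  refine ⟨(max (-off + b * ki) 0, max (-off + b * kj) 0), ?_, ?_⟩
  · unfold pvGrid
    refine List.mem_flatMap.mpr ⟨max (-off + b * ki) 0, ?_, ?_⟩
    · rw [PySem.List.mem_pyRange_one]; omega
    · exact List.mem_map.mpr ⟨max (-off + b * kj) 0, by rw [PySem.List.mem_pyRange_one]; omega, rfl⟩
  · unfold pvKey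
    refine Prod.ext ?_ ?_ <;> simp only
    · exact (pv_fd_eq_iff b off ki _ hb).mpr (by omega)
    · exact (pv_fd_eq_iff b off kj _ hb).mpr (by omega)

-- every enumerated block receives at least one node
theorem pv_contains_blocks (size : Int) (layout : Option (List Int)) (b off ki kj : Int)
    (hs : 1 ≤ size) (hb : 0 < b)
    (hi1 : -off + b * ki < size) (hi2 : 0 < -off + b * ki + b)
    (hj1 : -off + b * kj < size) (hj2 : 0 < -off + b * kj + b) :
    (pvBlocks size layout b off).contains (ki, kj) = true := by
  unfold pvBlocks
  rw [PySem.Dict.contains_iff_mem_keys]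
  rw [PySem.Dict.keys_foldl_modify_key (pvGrid size) (pvKey b off) PySem.Set.empty
      (fun _ p => fun s => PySem.Set.add s (pvXyToId p.1 p.2 size layout)) PySem.Dict.empty]
  rw [PySem.Dict.keys_empty, PySem.Set.update_nil_left]
  rw [PySem.Set.mem_ofList]
  obtain ⟨p, hp, hk⟩ := pv_mem_grid size b off ki kj hs hb hi1 hi2 hj1 hj2
  exact List.mem_map.mpr ⟨p, hp, hk⟩

-- A's non-empty test never fires on an enumerated block
theorem pv_S_ne_nil (size : Int) (layout : Option (List Int)) (b i j : Int)
    (hs : 1 ≤ size) (hb : 0 < b)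
    (hi1 : i < size) (hi2 : 0 < i + b) (hj1 : j < size) (hj2 : 0 < j + b) :
    pvS size layout b i j ≠ [] := by
  unfold pvS pvAdd1
  exact pv_foldl_add_ne_nil (pvP size b i j) (fun p => pvXyToId p.1 p.2 size layout)
    PySem.Set.empty (Or.inr (List.ne_nil_of_mem (pv_mem_P size b i j hs hb hi1 hi2 hj1 hj2)))

-- the per-level loop bodies of A and B agree (b = 2*off, off > 0, size ≥ 1)
theorem pv_level_eq (size : Int) (layout : Option (List Int)) (hs : 1 ≤ size)
    (L : Int × Int) (b off : Int) (hb : b = 2 * off) (ho : 0 < off)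
    (h : PySem.Dict (Int × Int) (List (List Int))) :
    (PySem.List.pyRange (-off) size b).foldl (fun h i =>
        (PySem.List.pyRange (-off) size b).foldl (fun h j =>
          if ((PySem.List.pyRange i (i + b) 1).foldl (fun s x =>
              (PySem.List.pyRange j (j + b) 1).foldl (fun s y =>
                if 0 ≤ x ∧ x < size ∧ 0 ≤ y ∧ y < size then
                  PySem.Set.add s (pvXyToId x y size layout)
                else s) s) PySem.Set.empty) = ([] : List Int) then h
          else h.modify L [] (fun lst => lst ++
            [(PySem.List.pyRange i (i + b) 1).foldl (fun s x =>
              (PySem.List.pyRange j (j + b) 1).foldl (fun s y =>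
                if 0 ≤ x ∧ x < size ∧ 0 ≤ y ∧ y < size then
                  PySem.Set.add s (pvXyToId x y size layout)
                else s) s) PySem.Set.empty])) h) h
    = (PySem.List.pyRange 0 (PySem.Int.floordiv (size + off + b - 1) b) 1).foldl (fun h ki =>
        (PySem.List.pyRange 0 (PySem.Int.floordiv (size + off + b - 1) b) 1).foldl (fun h kj =>
          if (pvBlocks size layout b off).contains (ki, kj) then
            h.modify L [] (fun lst => lst ++ [(pvBlocks size layout b off).getD (ki, kj) PySem.Set.empty])
          else h) h) h := by
  have hb0 : 0 < b := by omega
  set nb := PySem.Int.floordiv (size + off + b - 1) b with hnbdef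
  have hnb : nb * b ≤ size + off + b - 1 ∧ size + off + b - 1 < (nb + 1) * b :=
    (PySem.Int.floordiv_eq_iff_of_pos hb0).mp hnbdef.symm
  have hbound : ∀ k : Int, 0 ≤ k → k < nb →
      -off + b * k < size ∧ 0 < -off + b * k + b := by
    intro k hk0 hk1
    have h2 : b * k ≤ b * (nb - 1) := mul_le_mul_of_nonneg_left (by omega) (by omega)
    have h3 : 0 ≤ b * k := mul_nonneg (by omega) hk0
    constructor <;> nlinarith [hnb.1, hnb.2]
  have hA : PySem.List.pyRange (-off) size b
      = (PySem.List.pyRange 0 nb 1).map (fun k => -off + b * k) := by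
    rw [PySem.List.pyRange_of_pos (-off) size hb0, if_pos (by omega : -off < size),
        PySem.List.pyRange_one 0 nb, List.map_map]
    have hnum : size - -off + b - 1 = size + off + b - 1 := by omega
    rw [hnum]
    have hc : (size + off + b - 1) / b = nb := by
      rw [hnbdef, PySem.Int.floordiv_eq_ediv_of_pos hb0]
    rw [hc, sub_zero]
    apply List.map_congr_left
    intro k _
    simp
  rw [hA, List.foldl_map]
  apply PySem.List.foldl_congr_mem
  intro acc ki hki
  rw [List.foldl_map]
  apply PySem.List.foldl_congr_mem
  intro acc2 kj hkj
  rw [PySem.List.mem_pyRange_one] at hki hkj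
  obtain ⟨hi1, hi2⟩ := hbound ki hki.1 hki.2
  obtain ⟨hj1, hj2⟩ := hbound kj hkj.1 hkj.2
  rw [pv_nodesA_eq size layout b (-off + b * ki) (-off + b * kj)]
  rw [if_neg (pv_S_ne_nil size layout b _ _ hs hb0 hi1 hi2 hj1 hj2)]
  rw [if_pos (pv_contains_blocks size layout b off ki kj hs hb0 hi1 hi2 hj1 hj2)]
  rw [pv_getD_blocks size layout b off ki kj hb0]

theorem pv_ports_eq (size : Int) (layout : Option (List Int)) (hs : 1 ≤ size) :
    generate_type2_submeshes size layout = generate_type2_submeshes_alt size layout := by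
  simp only [generate_type2_submeshes, generate_type2_submeshes_alt]
  congr 1
  congr 1
  apply PySem.List.foldl_congr_mem
  intro acc level hlev
  rw [PySem.List.mem_pyRange_one] at hlev
  have hl1 : 1 ≤ level := hlev.1
  have hpow : (2:Int) ^ level.toNat = 2 * 2 ^ (level.toNat - 1) := by
    rw [← pow_succ']
    congr 1
    omega
  have hoff : PySem.Int.floordiv ((2:Int) ^ level.toNat) 2 = 2 ^ (level.toNat - 1) := by
    rw [hpow, PySem.Int.floordiv_eq_ediv_of_pos (by norm_num),
        Int.mul_ediv_cancel_left _ (by norm_num)]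
  simp only [hoff, pv_blocks_flat]
  exact pv_level_eq size layout hs (level, 1) (2 ^ level.toNat) (2 ^ (level.toNat - 1))
    hpow (by positivity) acc

-- ===== VERDICT (by name: the statement is the Claim_ definition above) =====
theorem generate_type2_submeshes_spec : Claim_equal_generate_type2_submeshes := by
  intro size layout _ hpre
  exact pv_ports_eq size layout hpre.1
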